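-- pv_equiv track=rewrite | github.com/andythetechnerd03/My-lil-bag-of-Algorithms | GCD as Linear Combination/gcd_as_linear_combination.py | find_quotients
-- ===== SOURCE A (Python) =====
-- def find_quotients(a, b):
--     x = a
--     y = b
--     quotients = []
--     while y != 0:
--         quotients.append(x // y)
--         r = x % y
--         x = y
--         y = r
--     return quotients
-- ===== SOURCE B (Python) =====
-- def find_quotients(a, b):
--     if b == 0:
--         return []
--     return [a // b] + find_quotients(b, a % b)
-- ===== Notes on version B (the rewrite author's own statement) =====
-- stated objective: idiomatic
-- what changed: Replaced the mutable while-loop with swapped variables by a direct recursive function mirroring the Euclidean recurrence: base case b == 0 yields [], otherwise a // b is prepended to the recursive call on (b, a % b).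
import Mathlib
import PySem

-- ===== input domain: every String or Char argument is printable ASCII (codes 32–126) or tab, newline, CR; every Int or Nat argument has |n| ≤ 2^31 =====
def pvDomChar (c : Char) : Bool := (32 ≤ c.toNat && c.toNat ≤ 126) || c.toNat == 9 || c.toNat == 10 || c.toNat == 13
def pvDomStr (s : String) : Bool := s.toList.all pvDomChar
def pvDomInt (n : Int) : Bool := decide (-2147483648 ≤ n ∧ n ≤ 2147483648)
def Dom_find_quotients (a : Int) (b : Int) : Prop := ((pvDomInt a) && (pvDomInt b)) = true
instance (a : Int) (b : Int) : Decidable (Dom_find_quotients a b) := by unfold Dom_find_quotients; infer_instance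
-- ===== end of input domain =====

-- B replaces A's mutable while-loop by the natural recursive Euclidean recurrence (idiomatic decomposition; same cost).


-- Python's % takes the divisor's sign and |x % y| < |y|, so |y| strictly decreases.
theorem pvModNatAbsLt (x y : Int) (hy : y ≠ 0) : (PySem.Int.mod x y).natAbs < y.natAbs := by
  rcases lt_or_gt_of_ne hy with h | h
  · have := PySem.Int.mod_neg_bounds (a := x) h
    omega
  · have h1 := PySem.Int.mod_nonneg (a := x) h
    have h2 := PySem.Int.mod_lt (a := x) h
    omega

-- ===== PORT A =====
-- the while-loop of A, threading (x, y, quotients)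
def fqLoop (x y : Int) (quotients : List Int) : List Int :=
  if hy : y = 0 then quotients
  else fqLoop y (PySem.Int.mod x y) (quotients ++ [PySem.Int.floordiv x y])
termination_by y.natAbs
decreasing_by exact pvModNatAbsLt x y hy

def find_quotients (a : Int) (b : Int) : List Int := fqLoop a b []

-- ===== PORT B =====
def find_quotients_alt (a : Int) (b : Int) : List Int :=
  if hb : b = 0 then []
  else PySem.Int.floordiv a b :: find_quotients_alt b (PySem.Int.mod a b)
termination_by b.natAbs
decreasing_by exact pvModNatAbsLt a b hb

-- ===== PRECONDITION & SPEC =====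
def Spec_find_quotients (a : Int) (b : Int) (out : List Int) : Prop := out = find_quotients_alt a b
instance (a : Int) (b : Int) (out : List Int) : Decidable (Spec_find_quotients a b out) := by unfold Spec_find_quotients; infer_instance

-- ===== CLAIM (what is proved, stated in full; the proofs are below) =====
def Claim_equal_find_quotients : Prop := ∀ (a : Int) (b : Int), Dom_find_quotients a b → Spec_find_quotients a b (find_quotients a b)

-- ===== LEMMAS AND PROOFS =====
theorem fqLoop_eq_acc_append (x y : Int) (acc : List Int) :
    fqLoop x y acc = acc ++ find_quotients_alt x y := by
  fun_induction fqLoop x y acc with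
  | case1 x acc =>
      rw [find_quotients_alt]
      simp
  | case2 x y acc hy ih =>
      rw [ih, List.append_assoc]
      conv_rhs => rw [find_quotients_alt, dif_neg hy]
      rfl

-- ===== VERDICT (by name: the statement is the Claim_ definition above) =====
theorem find_quotients_spec : Claim_equal_find_quotients := by
  intro a b _
  unfold Spec_find_quotients find_quotients
  simpa using fqLoop_eq_acc_append a b []
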